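-- pv_equiv track=rewrite | github.com/Skyturtl/Web-Scraper | Flask(modify).py | find_consecutive_positions
-- ===== SOURCE A (Python) =====
-- def find_consecutive_positions(positions_list):
--     """Returns the number of times the phrase appears consecutively in the document."""
--     if not positions_list:
--         return 0
--     first_term_pos = positions_list[0]
--     count = 0
--     for pos in first_term_pos:
--         is_consecutive = True
--         for i in range(1, len(positions_list)):
--             if (pos + i) not in positions_list[i]:
--                 is_consecutive = False
--                 break
--         if is_consecutive:
--             count += 1
--     return count
-- ===== SOURCE B (Python) =====
-- def find_consecutive_positions(positions_list):
--     """Returns the number of times the phrase appears consecutively in the document."""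
--     if not positions_list:
--         return 0
--     valid = None
--     for i in range(1, len(positions_list)):
--         shifted = {q - i for q in positions_list[i]}
--         valid = shifted if valid is None else valid & shifted
--     return sum(1 for p in positions_list[0] if valid is None or p in valid)
-- ===== Notes on version B (the rewrite author's own statement) =====
-- stated objective: alternative
-- what changed: Replaces A's per-start-position nested membership scan with a single pass that intersects shifted per-term position sets into one candidate set, then counts the first term's positions that lie in it.
import Mathlib
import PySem

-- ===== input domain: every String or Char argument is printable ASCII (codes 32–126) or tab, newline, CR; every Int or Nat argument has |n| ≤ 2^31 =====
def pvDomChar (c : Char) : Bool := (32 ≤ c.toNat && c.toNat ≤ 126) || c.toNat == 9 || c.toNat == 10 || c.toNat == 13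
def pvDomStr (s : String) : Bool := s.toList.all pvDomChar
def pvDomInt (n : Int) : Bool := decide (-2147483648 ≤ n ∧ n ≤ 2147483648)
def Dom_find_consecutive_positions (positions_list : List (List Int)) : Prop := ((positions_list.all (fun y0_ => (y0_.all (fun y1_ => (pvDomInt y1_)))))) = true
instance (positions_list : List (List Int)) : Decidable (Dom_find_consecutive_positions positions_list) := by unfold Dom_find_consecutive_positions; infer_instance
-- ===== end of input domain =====

-- B replaces A's nested membership scan per start position by one intersection of
-- shifted per-term position sets, then counts the first term's positions inside it (objective: alternative).

-- ===== PORT A =====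
-- inner 'for i in range(1, len(positions_list))' with break
def pvCheckA (pl : List (List Int)) (pos : Int) : List Int → Bool
  | [] => true
  | i :: rest =>
    if (pos + i) ∈ PySem.List.pyGetD pl i ([] : List Int) then pvCheckA pl pos rest
    else false

def find_consecutive_positions (positions_list : List (List Int)) : Int :=
  if positions_list = [] then 0
  else
    let first_term_pos := PySem.List.pyGetD positions_list 0 ([] : List Int)
    first_term_pos.foldl
      (fun count pos =>
        if pvCheckA positions_list pos (PySem.List.pyRange 1 positions_list.length 1) then count + 1
        else count) 0

-- ===== PORT B =====
-- 'valid is None or p in valid'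
def pvTestB (valid : Option (List Int)) (p : Int) : Bool :=
  match valid with
  | none => true
  | some v => decide (p ∈ v)

def find_consecutive_positions_alt (positions_list : List (List Int)) : Int :=
  if positions_list = [] then 0
  else
    let valid : Option (List Int) :=
      (PySem.List.pyRange 1 positions_list.length 1).foldl
        (fun valid i =>
          let shifted : PySem.Set Int :=
            PySem.Set.ofList ((PySem.List.pyGetD positions_list i ([] : List Int)).map (fun q => q - i))
          match valid with
          | none => some shifted
          | some v => some (PySem.Set.inter v shifted))
        none
    ((PySem.List.pyGetD positions_list 0 ([] : List Int)).countP (fun p => pvTestB valid p) : Int)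

-- ===== PRECONDITION & SPEC =====
def Spec_find_consecutive_positions (positions_list : List (List Int)) (out : Int) : Prop := out = find_consecutive_positions_alt positions_list
instance (positions_list : List (List Int)) (out : Int) : Decidable (Spec_find_consecutive_positions positions_list out) := by unfold Spec_find_consecutive_positions; infer_instance

-- ===== CLAIM (what is proved, stated in full; the proofs are below) =====
def Claim_equal_find_consecutive_positions : Prop := ∀ (positions_list : List (List Int)), Dom_find_consecutive_positions positions_list → Spec_find_consecutive_positions positions_list (find_consecutive_positions positions_list)

-- ===== LEMMAS AND PROOFS =====

-- A's early-exit inner loop is the conjunction over the index list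
theorem pvCheckA_eq_all (pl : List (List Int)) (pos : Int) (idxs : List Int) :
    pvCheckA pl pos idxs
      = idxs.all (fun i => decide ((pos + i) ∈ PySem.List.pyGetD pl i ([] : List Int))) := by
  induction idxs with
  | nil => rfl
  | cons i rest ih =>
    simp only [pvCheckA, List.all_cons]
    split_ifs with h <;> simp [h, ih]

-- B's intersection fold tests membership exactly as the conjunction over the index list
theorem pvTestB_foldl (pl : List (List Int)) (idxs : List Int) (v0 : Option (List Int)) (p : Int) :
    pvTestB
      (idxs.foldl
        (fun valid i =>
          let shifted : PySem.Set Int :=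
            PySem.Set.ofList ((PySem.List.pyGetD pl i ([] : List Int)).map (fun q => q - i))
          match valid with
          | none => some shifted
          | some v => some (PySem.Set.inter v shifted))
        v0) p
      = (pvTestB v0 p
          && idxs.all (fun i => decide ((p + i) ∈ PySem.List.pyGetD pl i ([] : List Int)))) := by
  induction idxs generalizing v0 with
  | nil => simp
  | cons i rest ih =>
    have hmem : ∀ (l : List Int),
        (p ∈ PySem.Set.ofList (l.map (fun q => q - i))) ↔ (p + i) ∈ l := by
      intro l
      rw [PySem.Set.mem_ofList, List.mem_map]
      constructor
      · rintro ⟨q, hq, rfl⟩; simpa using hq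
      · intro h; exact ⟨p + i, h, by ring⟩
    simp only [List.foldl_cons, List.all_cons]
    cases v0 with
    | none =>
      rw [ih]
      simp [pvTestB, hmem]
    | some v =>
      rw [ih]
      simp [pvTestB, PySem.Set.mem_inter, hmem, Bool.and_assoc]

-- ===== VERDICT (by name: the statement is the Claim_ definition above) =====
theorem find_consecutive_positions_spec : Claim_equal_find_consecutive_positions := by
  intro pl _
  unfold Spec_find_consecutive_positions find_consecutive_positions find_consecutive_positions_alt
  split_ifs with h
  · rfl
  · rw [PySem.List.foldl_if_add_one]
    simp only [zero_add]
    congr 1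
    apply List.countP_congr
    intro p _
    rw [pvCheckA_eq_all, pvTestB_foldl]
    simp [pvTestB]
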